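-- pv_equiv track=rewrite | github.com/David2024patton/iTaK-Agent-Framework | src/itak/cli/banner.py | colorize_string_horizontally
-- ===== SOURCE A (Python) =====
-- from typing import List, Tuple
--
-- RESET = "\033[0m"
--
-- BOLD = "\033[1m"
--
-- def colorize_string_horizontally(line: str, colors: List[str]) -> str:
--     """Apply gradient colors character by character (Horizontal Fade)."""
--     result = ""
--     for i, char in enumerate(line):
--         if i < len(colors):
--             result += f"{colors[i]}{char}"
--         else:
--             result += f"{colors[-1]}{char}"
--     return f"{BOLD}{result}{RESET}"
-- ===== SOURCE B (Python) =====
-- RESET = "\033[0m"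
--
-- BOLD = "\033[1m"
--
-- def colorize_string_horizontally(line, colors):
--     """Worklist version: pop colors off a (reversed) queue as characters are consumed, keep the last one; pieces joined once."""
--     queue = list(reversed(colors))
--     parts = [BOLD]
--     for ch in line:
--         if len(queue) > 1:
--             parts.append(queue.pop() + ch)
--         else:
--             parts.append(queue[-1] + ch)
--     parts.append(RESET)
--     return "".join(parts)
-- ===== Notes on version B (the rewrite author's own statement) =====
-- stated objective: alternative
-- what changed: Replaces A's indexed loop (comparing i to len(colors) and indexing colors[i]/colors[-1], rebuilding the string by +=) with an index-free worklist: the colors are reversed into a queue that is popped one color per character until a single color remains, which then paints the rest; pieces are collected in a list and joined once.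
import Mathlib
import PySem

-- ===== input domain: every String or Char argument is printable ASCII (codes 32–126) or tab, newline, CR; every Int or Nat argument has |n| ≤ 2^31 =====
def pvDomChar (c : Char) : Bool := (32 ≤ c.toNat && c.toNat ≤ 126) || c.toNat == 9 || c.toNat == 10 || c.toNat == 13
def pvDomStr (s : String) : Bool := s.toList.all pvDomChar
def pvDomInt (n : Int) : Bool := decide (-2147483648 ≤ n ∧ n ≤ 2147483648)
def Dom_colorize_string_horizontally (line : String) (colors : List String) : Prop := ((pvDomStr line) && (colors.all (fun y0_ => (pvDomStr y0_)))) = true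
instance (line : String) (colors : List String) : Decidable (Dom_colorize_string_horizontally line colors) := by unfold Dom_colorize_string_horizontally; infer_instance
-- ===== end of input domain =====

-- B replaces A's indexed loop (i compared to len(colors), colors[i]/colors[-1], string +=)
-- with an index-free worklist: colors are popped off a queue one per character until a single
-- color remains, which paints the rest; pieces are joined once. Objective: alternative.

-- ===== PORT A =====
def colorize_string_horizontally (line : String) (colors : List String) : String :=
  -- result = ""; for i, char in enumerate(line): …
  let result := (PySem.List.enumerate line.toList 0).foldl
    (fun result p =>
      if p.1 < (colors.length : Int) then
        result ++ PySem.List.pyGetD colors p.1 "" ++ String.ofList [p.2]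
      else
        result ++ PySem.List.pyGetD colors (-1) "" ++ String.ofList [p.2]) ""
  "\x1b[1m" ++ result ++ "\x1b[0m"

-- ===== PORT B =====
def colorize_string_horizontally_alt (line : String) (colors : List String) : String :=
  -- queue = list(reversed(colors)); parts = [BOLD]
  -- for ch in line: if len(queue) > 1: parts.append(queue.pop() + ch) else: parts.append(queue[-1] + ch)
  let st := line.toList.foldl
    (fun (st : List String × List String) ch =>
      if 1 < st.1.length then
        (st.1.dropLast, st.2 ++ [st.1.getLast?.getD "" ++ String.ofList [ch]])
      else
        (st.1, st.2 ++ [st.1.getLast?.getD "" ++ String.ofList [ch]]))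
    (colors.reverse, ["\x1b[1m"])
  -- parts.append(RESET); return "".join(parts)
  PySem.Str.join "" (st.2 ++ ["\x1b[0m"])

-- ===== PRECONDITION & SPEC =====
-- Pre_ excludes only the inputs where Python A raises IndexError (colors == [] with a
-- non-empty line, at colors[-1]); Python B raises IndexError there too (queue[0]).
def Pre_colorize_string_horizontally (line : String) (colors : List String) : Prop :=
  colors ≠ [] ∨ line.toList = []
instance (line : String) (colors : List String) : Decidable (Pre_colorize_string_horizontally line colors) := by unfold Pre_colorize_string_horizontally; infer_instance
def pvWitness_colorize_string_horizontally : String × List String := ("ab", ["<r>", "<g>"])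
def Spec_colorize_string_horizontally (line : String) (colors : List String) (out : String) : Prop := out = colorize_string_horizontally_alt line colors
instance (line : String) (colors : List String) (out : String) : Decidable (Spec_colorize_string_horizontally line colors out) := by unfold Spec_colorize_string_horizontally; infer_instance

-- ===== CLAIM (what is proved, stated in full; the proofs are below) =====
def Claim_equal_colorize_string_horizontally : Prop := ∀ (line : String) (colors : List String), Dom_colorize_string_horizontally line colors → Pre_colorize_string_horizontally line colors → Spec_colorize_string_horizontally line colors (colorize_string_horizontally line colors)

-- ===== LEMMAS AND PROOFS =====

-- the color A picks for absolute position i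
def pvColorAt (colors : List String) (i : Int) : String :=
  if i < (colors.length : Int) then PySem.List.pyGetD colors i ""
  else PySem.List.pyGetD colors (-1) ""

-- the pieces B's loop appends to parts, as a recursion over (chars, queue)
def pvPieces : List Char → List String → List String
  | [], _ => []
  | ch :: chs, cs =>
      (cs.headD "" ++ String.ofList [ch]) ::
        pvPieces chs (if 1 < cs.length then cs.tail else cs)

lemma pv_join_empty_sep (parts : List (List Char)) :
    PySem.Chars.join [] parts = parts.flatten := by
  induction parts with
  | nil => rfl
  | cons p ps ih =>
    cases ps with
    | nil => simp [PySem.Chars.join, List.intercalate]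
    | cons q qs =>
      have hstep : PySem.Chars.join [] (p :: q :: qs) = p ++ PySem.Chars.join [] (q :: qs) := by
        simp [PySem.Chars.join, List.intercalate]
      rw [hstep, ih]; simp

lemma pv_loopA (colors : List String) (cs : List Char) :
    ∀ (s : Int) (acc : String),
    ((PySem.List.enumerate cs s).foldl
      (fun result p =>
        if p.1 < (colors.length : Int) then
          result ++ PySem.List.pyGetD colors p.1 "" ++ String.ofList [p.2]
        else
          result ++ PySem.List.pyGetD colors (-1) "" ++ String.ofList [p.2]) acc).toList
    = acc.toList ++ ((PySem.List.enumerate cs s).map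
        (fun p => (pvColorAt colors p.1).toList ++ [p.2])).flatten := by
  induction cs with
  | nil => intro s acc; simp [PySem.List.enumerate_nil]
  | cons c cs ih =>
    intro s acc
    rw [PySem.List.enumerate_cons]
    simp only [List.foldl_cons, List.map_cons, List.flatten_cons, ih]
    by_cases h : s < (colors.length : Int) <;>
      simp [pvColorAt, h]

lemma pv_foldB (chs : List Char) :
    ∀ (cs parts : List String),
    (chs.foldl
      (fun (st : List String × List String) ch =>
        if 1 < st.1.length then
          (st.1.dropLast, st.2 ++ [st.1.getLast?.getD "" ++ String.ofList [ch]])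
        else
          (st.1, st.2 ++ [st.1.getLast?.getD "" ++ String.ofList [ch]]))
      (cs.reverse, parts)).2 = parts ++ pvPieces chs cs := by
  induction chs with
  | nil => intro cs parts; simp [pvPieces]
  | cons ch chs ih =>
    intro cs parts
    simp only [List.foldl_cons]
    have hlast : cs.reverse.getLast?.getD "" = cs.headD "" := by
      rw [List.getLast?_reverse, List.headD_eq_head?_getD]
    by_cases h : 1 < cs.length
    · have h' : 1 < cs.reverse.length := by simpa using h
      have hdrop : cs.reverse.dropLast = cs.tail.reverse := by
        cases cs with
        | nil => simp
        | cons a l => simp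
      rw [if_pos h', hdrop, ih, hlast]
      simp [pvPieces, h]
    · have h' : ¬ 1 < cs.reverse.length := by simpa using h
      rw [if_neg h']
      conv_lhs => rw [ih cs]
      rw [hlast]
      simp [pvPieces, h]

lemma pv_pieces_single (c : String) (chs : List Char) :
    pvPieces chs [c] = chs.map (fun ch => c ++ String.ofList [ch]) := by
  induction chs with
  | nil => simp [pvPieces]
  | cons ch chs ih => simp [pvPieces, ih]

lemma pv_colorAt_late (colors : List String) (h : colors ≠ []) (s : Int)
    (hs : (colors.length : Int) - 1 ≤ s) :
    pvColorAt colors s = colors.getLast h := by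
  unfold pvColorAt
  have hL : 0 < colors.length := List.length_pos_iff.mpr h
  by_cases hlt : s < (colors.length : Int)
  · have hs' : s = ((s.toNat : Nat) : Int) := by omega
    have hs0 : s.toNat = colors.length - 1 := by omega
    rw [if_pos hlt, hs', PySem.List.pyGetD_natCast]
    simp [List.getD_eq_getElem?_getD, hs0,
      List.getElem?_eq_getElem (by omega : colors.length - 1 < colors.length),
      List.getLast_eq_getElem]
  · rw [if_neg hlt]
    exact PySem.List.pyGetD_neg_one colors "" h

lemma pv_tail_map (colors : List String) (h : colors ≠ []) (chs : List Char) :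
    ∀ (s : Int), (colors.length : Int) - 1 ≤ s →
    (PySem.List.enumerate chs s).map
      (fun p => (pvColorAt colors p.1).toList ++ [p.2])
    = chs.map (fun ch => (colors.getLast h).toList ++ [ch]) := by
  induction chs with
  | nil => intro s _; simp [PySem.List.enumerate_nil]
  | cons c chs ih =>
    intro s hs
    rw [PySem.List.enumerate_cons]
    simp only [List.map_cons]
    rw [ih (s + 1) (by omega), pv_colorAt_late colors h s hs]

lemma pv_pieces_eq (colors : List String) (h : colors ≠ []) (chs : List Char) :
    ∀ (k : Nat), k < colors.length →
    ((pvPieces chs (colors.drop k)).map String.toList).flatten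
    = ((PySem.List.enumerate chs (k : Int)).map
        (fun p => (pvColorAt colors p.1).toList ++ [p.2])).flatten := by
  induction chs with
  | nil => intro k _; simp [pvPieces, PySem.List.enumerate_nil]
  | cons ch chs ih =>
    intro k hk
    rw [PySem.List.enumerate_cons]
    simp only [pvPieces, List.map_cons, List.flatten_cons]
    have hhead : (colors.drop k).headD "" = colors[k] := by
      rw [List.headD_eq_head?_getD, List.head?_drop]
      simp [List.getElem?_eq_getElem hk]
    have hcol : pvColorAt colors (k : Int) = colors[k] := by
      unfold pvColorAt
      simp [hk, List.getD_eq_getElem?_getD]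
    by_cases hlen : 1 < (colors.drop k).length
    · have hk1 : k + 1 < colors.length := by
        rw [List.length_drop] at hlen; omega
      have htail : (colors.drop k).tail = colors.drop (k + 1) := by
        rw [List.tail_drop]
      have hcast : ((k : Int) + 1) = ((k + 1 : Nat) : Int) := by push_cast; ring
      rw [if_pos hlen, htail, hcast, ih (k + 1) hk1, hhead, hcol]
      simp
    · have hk1 : k = colors.length - 1 := by
        rw [List.length_drop] at hlen; omega
      have hlast : colors[k] = colors.getLast h := by
        simp [List.getLast_eq_getElem, hk1]
      have hdrop : colors.drop k = [colors[k]] := by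
        rw [List.drop_eq_getElem_cons hk, List.drop_eq_nil_of_le (by omega)]
      rw [if_neg hlen, hdrop, pv_pieces_single,
        pv_tail_map colors h chs ((k : Int) + 1) (by omega)]
      simp [Function.comp_def, hcol, hlast]

-- ===== VERDICT (by name: the statement is the Claim_ definition above) =====
theorem colorize_string_horizontally_spec : Claim_equal_colorize_string_horizontally := by
  intro line colors _ hpre
  unfold Spec_colorize_string_horizontally
  unfold colorize_string_horizontally colorize_string_horizontally_alt
  rcases eq_or_ne colors [] with hc | hc
  · subst hc
    rcases hpre with hne | hl
    · exact absurd rfl hne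
    · apply String.toList_injective
      simp [hl, PySem.List.enumerate_nil, PySem.Str.join, pv_join_empty_sep]
  · apply String.toList_injective
    simp only [pv_foldB]
    simp only [String.toList_append, pv_loopA]
    have h0 : (0 : Nat) < colors.length := List.length_pos_iff.mpr hc
    have hmain := pv_pieces_eq colors hc line.toList 0 h0
    simp only [List.drop_zero, Int.natCast_zero] at hmain
    simp [PySem.Str.join, pv_join_empty_sep, hmain]
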